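-- pv_equiv track=rewrite | github.com/kcrescano/LearningPython | Hyperskill Projects/Christmas Tree/main.py | decorate_tree
-- ===== SOURCE A (Python) =====
-- def decorate_tree(tree, interval):
--     current_decoration = 1
--     for tree_row in tree:
--         star_indices = [j for j, char in enumerate(tree_row) if char == '*'][1: -1: 2]
--         for i in star_indices:
--             if current_decoration == 1:
--                 tree_row[i] = 'O'
--             current_decoration += 1
--             if current_decoration > interval:
--                 current_decoration = 1
--     return tree
-- ===== SOURCE B (Python) =====
-- def decorate_tree(tree, interval):
--     # Arithmetic-stride decomposition: instead of walking every target with a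
--     # wrap-around counter, compute per row which target indices are decorated
--     # (those congruent to -offset mod p, p = max(interval, 1)) and jump straight
--     # to them with a stepped range. Mutates the same row lists in place, like A.
--     p = interval if interval > 1 else 1
--     offset = 0
--     for row in tree:
--         stars = [j for j, ch in enumerate(row) if ch == '*'][1:-1:2]
--         for i in range((-offset) % p, len(stars), p):
--             row[stars[i]] = 'O'
--         offset += len(stars)
--     return tree
-- ===== Notes on version B (the rewrite author's own statement) =====
-- stated objective: alternative
-- what changed: Replaces A's per-target wrap-around counter with per-row modular arithmetic: for each row it computes the residue of decorated target indices ((-offset) % p, p = max(interval,1)) and jumps straight to them with a stepped range, touching no other target.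
import Mathlib
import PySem

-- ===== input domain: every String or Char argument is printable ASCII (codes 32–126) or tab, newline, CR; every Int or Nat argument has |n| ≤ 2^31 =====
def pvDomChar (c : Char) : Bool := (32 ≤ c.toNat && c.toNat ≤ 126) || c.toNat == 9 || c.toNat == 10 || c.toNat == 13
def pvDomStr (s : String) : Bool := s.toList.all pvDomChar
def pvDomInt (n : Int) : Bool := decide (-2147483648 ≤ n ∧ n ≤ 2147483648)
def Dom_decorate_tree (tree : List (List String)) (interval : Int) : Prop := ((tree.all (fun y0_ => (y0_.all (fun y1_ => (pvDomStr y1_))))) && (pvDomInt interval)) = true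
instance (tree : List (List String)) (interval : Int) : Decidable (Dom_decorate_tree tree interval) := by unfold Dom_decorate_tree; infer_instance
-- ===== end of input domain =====

-- B replaces A's per-target wrap-around counter with per-row modular arithmetic,
-- jumping with a stepped range straight to the decorated targets.
-- Both Pythons mutate the given rows in place; the equivalence is about the returned value.

-- ===== PORT A =====
-- shared subexpression of both Pythons: [j for j, char in enumerate(row) if char == '*'][1:-1:2]
def pvStars (row : List String) : List Int :=
  (PySem.List.slice? ((PySem.List.enumerate row 0).filterMap
      (fun p => if p.2 == "*" then some p.1 else none)) (some 1) (some (-1)) 2).getD []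

def decorate_tree (tree : List (List String)) (interval : Int) : List (List String) :=
  (tree.foldl (fun (acc : List (List String) × Int) tree_row =>
      let star_indices := pvStars tree_row
      let res := star_indices.foldl (fun (st : List String × Int) i =>
        let row1 := if st.2 == 1 then st.1.set i.toNat "O" else st.1
        let c1 := st.2 + 1
        (row1, if interval < c1 then 1 else c1)) (tree_row, acc.2)
      (acc.1 ++ [res.1], res.2)) ([], 1)).1

-- ===== PORT B =====
def decorate_tree_alt (tree : List (List String)) (interval : Int) : List (List String) :=
  let p : Int := if 1 < interval then interval else 1
  (tree.foldl (fun (acc : List (List String) × Int) row =>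
      let stars := pvStars row
      let row' := (PySem.List.pyRange (PySem.Int.mod (-acc.2) p) (stars.length : Int) p).foldl
        (fun r i => r.set (PySem.List.pyGetD stars i 0).toNat "O") row
      (acc.1 ++ [row'], acc.2 + (stars.length : Int))) ([], 0)).1

-- ===== PRECONDITION & SPEC =====
def Spec_decorate_tree (tree : List (List String)) (interval : Int) (out : List (List String)) : Prop := out = decorate_tree_alt tree interval
instance (tree : List (List String)) (interval : Int) (out : List (List String)) : Decidable (Spec_decorate_tree tree interval out) := by unfold Spec_decorate_tree; infer_instance

-- ===== CLAIM (what is proved, stated in full; the proofs are below) =====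
def Claim_equal_decorate_tree : Prop := ∀ (tree : List (List String)) (interval : Int), Dom_decorate_tree tree interval → Spec_decorate_tree tree interval (decorate_tree tree interval)

-- ===== LEMMAS AND PROOFS =====

-- common functional description: decorate the j-th global target iff its index ≡ 0 (mod p)
def decoRow (p : Int) : Int → List String → List Int → List String
  | _, row, [] => row
  | k0, row, j :: rest =>
      decoRow p (k0 + 1) (if PySem.Int.mod k0 p == 0 then row.set j.toNat "O" else row) rest

def decoTree (p : Int) : Int → List (List String) → List (List String)
  | _, [] => []
  | k0, row :: rest =>
      decoRow p k0 row (pvStars row) :: decoTree p (k0 + (pvStars row).length) rest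

def totLen : List (List String) → Nat
  | [] => 0
  | row :: rest => (pvStars row).length + totLen rest

lemma pvP_pos (interval : Int) : 0 < (if 1 < interval then interval else 1) := by
  split <;> omega

lemma pvMod_succ (p k : Int) (hp : 0 < p) :
    (k + 1) % p = if k % p + 1 = p then 0 else k % p + 1 := by
  have hk : k % p + p * (k / p) = k := Int.emod_add_mul_ediv k p
  have h1 : (k + 1) % p = (k % p + 1) % p := by
    conv_lhs => rw [← hk]
    rw [show k % p + p * (k / p) + 1 = (k % p + 1) + p * (k / p) by ring]
    apply Int.add_mul_emod_self_left
  have h0 : 0 ≤ k % p := Int.emod_nonneg k (by omega)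
  have h2 : k % p < p := Int.emod_lt_of_pos k hp
  rw [h1]
  split
  · next h => rw [h, Int.emod_self]
  · next h => exact Int.emod_eq_of_lt (by omega) (by omega)

lemma pvModEq (p k : Int) (hp : 0 < p) : PySem.Int.mod k p = k % p :=
  PySem.Int.mod_eq_emod_of_pos hp

-- A's inner loop over one row with counter k0 % p + 1 decorates exactly decoRow
lemma pvRowA (interval p : Int) (hpi : p = if 1 < interval then interval else 1)
    (stars : List Int) :
    ∀ (row : List String) (k0 : Int),
    stars.foldl (fun (st : List String × Int) i =>
        let row1 := if st.2 == 1 then st.1.set i.toNat "O" else st.1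
        let c1 := st.2 + 1
        (row1, if interval < c1 then 1 else c1))
      (row, PySem.Int.mod k0 p + 1)
    = (decoRow p k0 row stars, PySem.Int.mod (k0 + stars.length) p + 1) := by
  have hp : 0 < p := hpi ▸ pvP_pos interval
  induction stars with
  | nil => intro row k0; simp [decoRow]
  | cons j rest ih =>
    intro row k0
    rw [List.foldl_cons]
    have hm0 : 0 ≤ k0 % p := Int.emod_nonneg k0 (by omega)
    have hm1 : k0 % p < p := Int.emod_lt_of_pos k0 hp
    have hcond : (PySem.Int.mod k0 p + 1 == 1) = (PySem.Int.mod k0 p == 0) := by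
      rw [pvModEq p k0 hp]; by_cases h : k0 % p = 0 <;> simp [h] <;> omega
    have hstep : (if interval < PySem.Int.mod k0 p + 1 + 1 then (1 : Int)
        else PySem.Int.mod k0 p + 1 + 1) = PySem.Int.mod (k0 + 1) p + 1 := by
      rw [pvModEq p k0 hp, pvModEq p (k0 + 1) hp, pvMod_succ p k0 hp]
      have hcase : p = interval ∨ (interval ≤ 1 ∧ p = 1) := by
        rw [hpi]; split <;> omega
      rcases hcase with h | ⟨h, h1⟩
      · subst h; split <;> split <;> omega
      · rw [h1]; split <;> split <;> omega
    simp only [hcond, hstep]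
    have := ih (if PySem.Int.mod k0 p == 0 then row.set j.toNat "O" else row) (k0 + 1)
    simp only [decoRow]
    rw [show k0 + ((j :: rest).length : Int) = k0 + 1 + (rest.length : Int) by
      simp only [List.length_cons]; push_cast; omega]
    exact this

-- A's outer loop equals decoTree, threading the global target count
lemma pvTreeA (interval p : Int) (hpi : p = if 1 < interval then interval else 1)
    (rows : List (List String)) :
    ∀ (acc : List (List String)) (k0 : Int),
    rows.foldl (fun (ac : List (List String) × Int) tree_row =>
        let star_indices := pvStars tree_row
        let res := star_indices.foldl (fun (st : List String × Int) i =>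
          let row1 := if st.2 == 1 then st.1.set i.toNat "O" else st.1
          let c1 := st.2 + 1
          (row1, if interval < c1 then 1 else c1)) (tree_row, ac.2)
        (ac.1 ++ [res.1], res.2))
      (acc, PySem.Int.mod k0 p + 1)
    = (acc ++ decoTree p k0 rows, PySem.Int.mod (k0 + (totLen rows : Int)) p + 1) := by
  induction rows with
  | nil => intro acc k0; simp [decoTree, totLen]
  | cons row rest ih =>
    intro acc k0
    rw [List.foldl_cons]
    simp only [pvRowA interval p hpi (pvStars row) row k0]
    have := ih (acc ++ [decoRow p k0 row (pvStars row)]) (k0 + ((pvStars row).length : Int))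
    have harg : k0 + ((pvStars row).length : Int) + ((totLen rest : Nat) : Int)
        = k0 + ((totLen (row :: rest) : Nat) : Int) := by
      simp [totLen]; ring
    rw [harg] at this
    rw [this, decoTree]
    simp

-- pyRange with a positive step peels its first element
lemma pvRange_pos_cons (a b p : Int) (hp : 0 < p) (hab : a < b) :
    PySem.List.pyRange a b p = a :: PySem.List.pyRange (a + p) b p := by
  rw [PySem.List.pyRange_of_pos a b hp, PySem.List.pyRange_of_pos (a + p) b hp]
  have hq : 0 ≤ (b - a - 1) / p := Int.ediv_nonneg (by omega) (by omega)
  have hstep : (b - a + p - 1) / p = (b - a - 1) / p + 1 := by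
    rw [show b - a + p - 1 = (b - a - 1) + 1 * p by ring, Int.add_mul_ediv_right _ _ (by omega)]
  by_cases h2 : a + p < b
  · rw [if_pos hab, if_pos h2]
    rw [show b - (a + p) + p - 1 = b - a - 1 by ring]
    rw [hstep, show ((b - a - 1) / p + 1).toNat = ((b - a - 1) / p).toNat + 1 by omega]
    rw [List.range_succ_eq_map, List.map_cons, List.map_map]
    congr 1
    · norm_num
    · apply List.map_congr_left
      intro k _
      simp [Function.comp]
      ring
  · rw [if_pos hab, if_neg h2]
    have hlt : b - a - 1 < p := by omega
    have : (b - a - 1) / p = 0 := Int.ediv_eq_zero_of_lt (by omega) hlt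
    rw [hstep, this]
    norm_num

-- shifting a stepped-range indexed fold past the head of the index list
lemma pvShift (p : Int) (hp : 0 < p) (a : Int) (ha : 1 ≤ a) (n : Nat)
    (j : Int) (rest : List Int) (row : List String) :
    (PySem.List.pyRange a ((n : Int) + 1) p).foldl
      (fun r i => r.set (PySem.List.pyGetD (j :: rest) i 0).toNat "O") row
    = (PySem.List.pyRange (a - 1) (n : Int) p).foldl
      (fun r i => r.set (PySem.List.pyGetD rest i 0).toNat "O") row := by
  rw [PySem.List.pyRange_of_pos a _ hp, PySem.List.pyRange_of_pos (a - 1) _ hp]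
  have hiff : (a < (n : Int) + 1) ↔ (a - 1 < (n : Int)) := by omega
  have hcnt : ((n : Int) + 1 - a + p - 1) / p = ((n : Int) - (a - 1) + p - 1) / p := by
    congr 1; ring
  by_cases hlt : a < (n : Int) + 1
  · rw [if_pos hlt, if_pos (hiff.mp hlt), hcnt]
    rw [List.foldl_map, List.foldl_map]
    apply PySem.List.foldl_congr_mem
    intro acc k _
    have hpk : 0 ≤ p * (k : Int) := mul_nonneg (by omega) (by positivity)
    have h1 : (1 : Int) ≤ a + p * (k : Int) := by omega
    have hge : 0 ≤ a + p * (k : Int) := by omega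
    have hge' : 0 ≤ a - 1 + p * (k : Int) := by omega
    rw [PySem.List.pyGetD_of_nonneg _ _ hge, PySem.List.pyGetD_of_nonneg _ _ hge']
    have htn : (a + p * (k : Int)).toNat = (a - 1 + p * (k : Int)).toNat + 1 := by omega
    rw [htn]
    simp
  · rw [if_neg hlt, if_neg (fun h => hlt (hiff.mpr h))]
    simp

lemma pvNegMod_zero_iff (p k0 : Int) :
    ((-k0) % p = 0) ↔ (k0 % p = 0) := by
  constructor
  · intro hz
    exact Int.emod_eq_zero_of_dvd (Int.dvd_neg.mp (Int.dvd_of_emod_eq_zero hz))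
  · intro hz
    exact Int.emod_eq_zero_of_dvd (Dvd.dvd.neg_right (Int.dvd_of_emod_eq_zero hz))

-- the modulus of the NEXT global index, in both branches
lemma pvNegMod_succ (p k0 : Int) (hp : 0 < p) :
    (-(k0 + 1)) % p = if k0 % p = 0 then p - 1 else (-k0) % p - 1 := by
  have hk : (-k0) % p + p * ((-k0) / p) = -k0 := Int.emod_add_mul_ediv (-k0) p
  have h0 : 0 ≤ (-k0) % p := Int.emod_nonneg _ (by omega)
  have h1 : (-k0) % p < p := Int.emod_lt_of_pos _ hp
  have hrw : -(k0 + 1) = ((-k0) % p - 1) + p * ((-k0) / p) := by omega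
  have hbase : (-(k0 + 1)) % p = ((-k0) % p - 1) % p := by
    rw [hrw]; apply Int.add_mul_emod_self_left
  by_cases h : k0 % p = 0
  · have hz : (-k0) % p = 0 := (pvNegMod_zero_iff p k0).mpr h
    rw [if_pos h, hbase, hz]
    rw [show (0 : Int) - 1 = (p - 1) + p * (-1) by ring, Int.add_mul_emod_self_left]
    exact Int.emod_eq_of_lt (by omega) (by omega)
  · have hnz : (-k0) % p ≠ 0 := fun hz => h ((pvNegMod_zero_iff p k0).mp hz)
    rw [if_neg h, hbase]
    exact Int.emod_eq_of_lt (by omega) (by omega)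

-- B's stepped-range inner loop over one row equals decoRow
lemma pvRowB (p : Int) (hp : 0 < p) (js : List Int) :
    ∀ (row : List String) (k0 : Int),
    (PySem.List.pyRange (PySem.Int.mod (-k0) p) (js.length : Int) p).foldl
      (fun r i => r.set (PySem.List.pyGetD js i 0).toNat "O") row
    = decoRow p k0 row js := by
  induction js with
  | nil =>
    intro row k0
    rw [pvModEq p (-k0) hp, PySem.List.pyRange_of_pos _ _ hp]
    have h0 : 0 ≤ (-k0) % p := Int.emod_nonneg _ (by omega)
    rw [if_neg (by simp; omega)]
    simp [decoRow]
  | cons j rest ih =>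
    intro row k0
    rw [pvModEq p (-k0) hp]
    have h0 : 0 ≤ (-k0) % p := Int.emod_nonneg _ (by omega)
    have h1 : (-k0) % p < p := Int.emod_lt_of_pos _ hp
    have hlen : ((j :: rest).length : Int) = (rest.length : Int) + 1 := by simp
    by_cases hz : k0 % p = 0
    · have hs0 : (-k0) % p = 0 := (pvNegMod_zero_iff p k0).mpr hz
      rw [hs0, hlen, pvRange_pos_cons 0 _ p hp (by omega), List.foldl_cons]
      have hget : (PySem.List.pyGetD (j :: rest) 0 0).toNat = j.toNat := by
        rw [PySem.List.pyGetD_of_nonneg _ _ le_rfl]; simp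
      rw [hget, Int.zero_add, pvShift p hp p (by omega) rest.length j rest _]
      have hnext : p - 1 = (-(k0 + 1)) % p := by rw [pvNegMod_succ p k0 hp, if_pos hz]
      rw [hnext, show (-(k0 + 1)) % p = PySem.Int.mod (-(k0 + 1)) p from
        (pvModEq p (-(k0 + 1)) hp).symm, ih (row.set j.toNat "O") (k0 + 1)]
      simp [decoRow, pvModEq p k0 hp, hz]
    · have hs1 : 1 ≤ (-k0) % p := by
        rcases (lt_or_eq_of_le h0) with h | h
        · omega
        · exact absurd ((pvNegMod_zero_iff p k0).mp h.symm) hz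
      rw [hlen, pvShift p hp ((-k0) % p) hs1 rest.length j rest row]
      have hnext : (-k0) % p - 1 = (-(k0 + 1)) % p := by
        rw [pvNegMod_succ p k0 hp, if_neg hz]
      rw [hnext, show (-(k0 + 1)) % p = PySem.Int.mod (-(k0 + 1)) p from
        (pvModEq p (-(k0 + 1)) hp).symm, ih row (k0 + 1)]
      simp [decoRow, pvModEq p k0 hp, hz]

-- B's outer loop equals decoTree, threading the exact global offset
lemma pvTreeB (p : Int) (hp : 0 < p) (rows : List (List String)) :
    ∀ (acc : List (List String)) (k0 : Int),
    rows.foldl (fun (ac : List (List String) × Int) row =>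
        let stars := pvStars row
        let row' := (PySem.List.pyRange (PySem.Int.mod (-ac.2) p) (stars.length : Int) p).foldl
          (fun r i => r.set (PySem.List.pyGetD stars i 0).toNat "O") row
        (ac.1 ++ [row'], ac.2 + (stars.length : Int)))
      (acc, k0)
    = (acc ++ decoTree p k0 rows, k0 + (totLen rows : Int)) := by
  induction rows with
  | nil => intro acc k0; simp [decoTree, totLen]
  | cons row rest ih =>
    intro acc k0
    rw [List.foldl_cons]
    simp only [pvRowB p hp (pvStars row) row k0]
    have := ih (acc ++ [decoRow p k0 row (pvStars row)]) (k0 + ((pvStars row).length : Int))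
    rw [this, decoTree]
    simp [totLen]
    ring

-- ===== VERDICT (by name: the statement is the Claim_ definition above) =====
theorem decorate_tree_spec : Claim_equal_decorate_tree := by
  intro tree interval _
  unfold Spec_decorate_tree decorate_tree decorate_tree_alt
  set p : Int := if 1 < interval then interval else 1 with hpdef
  have hp : 0 < p := pvP_pos interval
  have hA := pvTreeA interval p hpdef tree [] 0
  rw [show PySem.Int.mod 0 p + 1 = 1 by rw [pvModEq p 0 hp]; simp] at hA
  rw [hA]
  have hB := pvTreeB p hp tree [] 0
  simp only [hB, List.nil_append]
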